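-- pv_equiv track=rewrite | github.com/bus94/Study | Daily_Challenge/day6.py | solution
-- ===== SOURCE A (Python) =====
-- def solution(n, c):
--     for c in c:
--         if c == "w":
--             n += 1
--         elif c == "s":
--             n -= 1
--         elif c == "d":
--             n += 10
--         elif c == "a":
--             n -= 10
--     return n
-- ===== SOURCE B (Python) =====
-- def solution(n, c):
--     return (n + c.count("w") - c.count("s")
--               + 10 * c.count("d") - 10 * c.count("a"))
-- ===== Notes on version B (the rewrite author's own statement) =====
-- stated objective: simpler
-- what changed: Replaced the per-character loop with four if/elif branches by a branchless closed-form expression combining the four character counts arithmetically.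
import Mathlib
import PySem

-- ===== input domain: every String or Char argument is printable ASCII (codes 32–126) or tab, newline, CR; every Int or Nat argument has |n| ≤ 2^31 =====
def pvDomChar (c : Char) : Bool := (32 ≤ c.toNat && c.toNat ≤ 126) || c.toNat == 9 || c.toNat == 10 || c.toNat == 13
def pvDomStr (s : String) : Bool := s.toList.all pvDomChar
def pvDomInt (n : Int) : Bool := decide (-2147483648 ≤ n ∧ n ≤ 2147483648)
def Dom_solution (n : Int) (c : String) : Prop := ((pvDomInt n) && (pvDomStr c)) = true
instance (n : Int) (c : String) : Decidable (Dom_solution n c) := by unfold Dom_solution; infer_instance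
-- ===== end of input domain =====

-- B replaces A's per-character loop with a closed-form combination of four character counts (objective: simpler).

-- ===== PORT A =====
-- A: loop over the characters, updating n per branch.
def solution (n : Int) (c : String) : Int :=
  c.toList.foldl (fun n ch =>
    if ch == 'w' then n + 1
    else if ch == 's' then n - 1
    else if ch == 'd' then n + 10
    else if ch == 'a' then n - 10
    else n) n

-- ===== PORT B =====
-- B: n + c.count("w") - c.count("s") + 10*c.count("d") - 10*c.count("a")
def solution_alt (n : Int) (c : String) : Int :=
  n + (PySem.Str.count c "w" : Int) - (PySem.Str.count c "s" : Int)
    + 10 * (PySem.Str.count c "d" : Int) - 10 * (PySem.Str.count c "a" : Int)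

-- ===== PRECONDITION & SPEC =====
def Spec_solution (n : Int) (c : String) (out : Int) : Prop := out = solution_alt n c
instance (n : Int) (c : String) (out : Int) : Decidable (Spec_solution n c out) := by unfold Spec_solution; infer_instance

-- ===== CLAIM (what is proved, stated in full; the proofs are below) =====
def Claim_equal_solution : Prop := ∀ (n : Int) (c : String), Dom_solution n c → Spec_solution n c (solution n c)

-- ===== LEMMAS AND PROOFS =====

-- Python's str.count with a single-character needle is the character count.
theorem chars_count_go_singleton (ch : Char) (l : List Char) (fuel acc : Nat)
    (h : l.length ≤ fuel) :
    PySem.Chars.count.go [ch] fuel l acc = acc + l.count ch := by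
  induction l generalizing fuel acc with
  | nil => cases fuel <;> simp [PySem.Chars.count.go]
  | cons hd tl ih =>
    cases fuel with
    | zero => simp at h
    | succ f =>
      simp only [PySem.Chars.count.go, List.isPrefixOf, List.drop, List.length_cons] at *
      by_cases hc : hd = ch
      · simp [hc, ih f (acc + 1) (by omega)]
        omega
      · have : (ch == hd) = false := by simp [Ne.symm hc]
        simp [this, ih f acc (by omega), hc]

theorem chars_count_singleton (ch : Char) (l : List Char) :
    PySem.Chars.count l [ch] = l.count ch := by
  simp [PySem.Chars.count, List.isEmpty, chars_count_go_singleton ch l l.length 0 le_rfl]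

theorem foldl_wasd (l : List Char) (n : Int) :
    l.foldl (fun n ch =>
      if ch == 'w' then n + 1
      else if ch == 's' then n - 1
      else if ch == 'd' then n + 10
      else if ch == 'a' then n - 10
      else n) n
    = n + (l.count 'w' : Int) - (l.count 's' : Int)
        + 10 * (l.count 'd' : Int) - 10 * (l.count 'a' : Int) := by
  induction l generalizing n with
  | nil => simp
  | cons hd tl ih =>
    by_cases hw : hd = 'w'
    · subst hw; rw [List.foldl_cons, ih]; simp [List.count_cons]; ring
    · by_cases hs : hd = 's'
      · subst hs; rw [List.foldl_cons, ih]; simp [List.count_cons]; ring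
      · by_cases hd' : hd = 'd'
        · subst hd'; rw [List.foldl_cons, ih]; simp [List.count_cons]; ring
        · by_cases ha : hd = 'a'
          · subst ha; rw [List.foldl_cons, ih]; simp [List.count_cons]; ring
          · rw [List.foldl_cons, ih]; simp [List.count_cons, hw, hs, hd', ha]

-- ===== VERDICT (by name: the statement is the Claim_ definition above) =====
theorem solution_spec : Claim_equal_solution := by
  intro n c _
  unfold Spec_solution solution solution_alt
  simp only [PySem.Str.count_eq]
  show _ = n + (PySem.Chars.count c.toList ['w'] : Int) - (PySem.Chars.count c.toList ['s'] : Int)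
    + 10 * (PySem.Chars.count c.toList ['d'] : Int) - 10 * (PySem.Chars.count c.toList ['a'] : Int)
  simp only [chars_count_singleton]
  exact foldl_wasd c.toList n
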